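-- pv_equiv track=rewrite | github.com/yusx-swapp/fedlib | src/fedlib/ve/csfl.py | split_list_into_m_sublists
-- ===== SOURCE A (Python) =====
-- def split_list_into_m_sublists(lst, m):
--     sublist_size = len(lst) // m
--     remainder = len(lst) % m
--
--     sublists = []
--     start = 0
--
--     for i in range(m):
--         sublist_length = sublist_size + (1 if i < remainder else 0)
--         sublist = lst[start:start+sublist_length]
--         sublists.append(sublist)
--         start += sublist_length
--
--     return sublists
-- ===== SOURCE B (Python) =====
-- def split_list_into_m_sublists(lst, m):
--     rest = list(lst)
--     out = []
--     for j in range(m, 0, -1):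
--         chunk = [rest.pop() for _ in range(len(rest) // j)]
--         chunk.reverse()
--         out.append(chunk)
--     out.reverse()
--     return out
-- ===== Notes on version B (the rewrite author's own statement) =====
-- stated objective: alternative
-- what changed: B abandons A's precomputed size/remainder and running start pointer: it consumes the list back-to-front, greedily popping floor(len(rest)/j) elements off the end for j = m..1 (re-dividing the shrinking remainder each step) and reversing the collected chunks at the end.
import Mathlib
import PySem

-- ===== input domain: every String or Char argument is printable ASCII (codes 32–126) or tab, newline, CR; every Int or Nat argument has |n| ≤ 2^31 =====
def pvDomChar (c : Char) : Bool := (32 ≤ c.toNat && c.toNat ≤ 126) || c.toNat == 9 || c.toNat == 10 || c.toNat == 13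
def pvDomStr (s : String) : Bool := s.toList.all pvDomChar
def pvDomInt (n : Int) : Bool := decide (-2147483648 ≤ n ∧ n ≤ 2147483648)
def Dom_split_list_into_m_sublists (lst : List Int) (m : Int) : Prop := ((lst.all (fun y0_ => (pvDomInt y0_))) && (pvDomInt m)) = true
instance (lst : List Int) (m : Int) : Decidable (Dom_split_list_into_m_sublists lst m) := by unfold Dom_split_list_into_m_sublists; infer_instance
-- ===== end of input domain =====

-- B replaces A's precomputed size/remainder + running start pointer with a greedy
-- back-to-front consumption (pop floor(len(rest)/j) off the end for j = m..1); return-value equivalence.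
-- ===== PORT A =====
def split_list_into_m_sublists (lst : List Int) (m : Int) : List (List Int) :=
  let sublist_size := PySem.Int.floordiv (lst.length : Int) m
  let remainder := PySem.Int.mod (lst.length : Int) m
  ((PySem.List.pyRange 0 m 1).foldl
    (fun (st : List (List Int) × Int) i =>
      let sublist_length := sublist_size + (if i < remainder then 1 else 0)
      let sublist := PySem.List.slice lst (some st.2) (some (st.2 + sublist_length))
      (st.1 ++ [sublist], st.2 + sublist_length))
    ([], 0)).1

-- ===== PORT B =====
-- [rest.pop() for _ in range(k)]: pops k times from the end, in pop order; returns (chunk, new rest).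
-- rest.pop() on empty raises, but B only calls it with k = len(rest)//j ≤ len(rest); getLastD 0 is exact there.
def pvPopN (rest : List Int) (k : Nat) : List Int × List Int :=
  match k with
  | 0 => ([], rest)
  | Nat.succ k' =>
    let x := rest.getLastD 0
    let p := pvPopN rest.dropLast k'
    (x :: p.1, p.2)

def split_list_into_m_sublists_alt (lst : List Int) (m : Int) : List (List Int) :=
  let st := (PySem.List.pyRange m 0 (-1)).foldl
    (fun (st : List Int × List (List Int)) j =>
      let p := pvPopN st.1 ((PySem.Int.floordiv (st.1.length : Int) j).toNat)
      (p.2, st.2 ++ [p.1.reverse]))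
    (lst, [])
  st.2.reverse

-- ===== PRECONDITION & SPEC =====
-- Pre_ excludes m = 0, on which Python A raises ZeroDivisionError.
def Pre_split_list_into_m_sublists (lst : List Int) (m : Int) : Prop := m ≠ 0
instance (lst : List Int) (m : Int) : Decidable (Pre_split_list_into_m_sublists lst m) := by unfold Pre_split_list_into_m_sublists; infer_instance
def pvWitness_split_list_into_m_sublists : List Int × Int := ([1, 2, 3, 4, 5], 3)

def Spec_split_list_into_m_sublists (lst : List Int) (m : Int) (out : List (List Int)) : Prop := out = split_list_into_m_sublists_alt lst m
instance (lst : List Int) (m : Int) (out : List (List Int)) : Decidable (Spec_split_list_into_m_sublists lst m out) := by unfold Spec_split_list_into_m_sublists; infer_instance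

-- ===== CLAIM (what is proved, stated in full; the proofs are below) =====
def Claim_equal_split_list_into_m_sublists : Prop := ∀ (lst : List Int) (m : Int), Dom_split_list_into_m_sublists lst m → Pre_split_list_into_m_sublists lst m → Spec_split_list_into_m_sublists lst m (split_list_into_m_sublists lst m)

-- ===== LEMMAS AND PROOFS =====

-- A's fold over range(a, a+n) starting at the closed-form start a*s + min a r
-- produces exactly the map of closed-form slices, ending at (a+n)*s + min (a+n) r.
theorem fold_eq_map (lst : List Int) (s r : Int) :
    ∀ (n : Nat) (a : Int) (acc : List (List Int)),
      (PySem.List.pyRange a (a + n) 1).foldl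
        (fun (st : List (List Int) × Int) i =>
          let L := s + (if i < r then 1 else 0)
          (st.1 ++ [PySem.List.slice lst (some st.2) (some (st.2 + L))], st.2 + L))
        (acc, a * s + min a r)
      = (acc ++ (PySem.List.pyRange a (a + n) 1).map (fun i =>
          PySem.List.slice lst (some (i * s + min i r)) (some ((i + 1) * s + min (i + 1) r))),
         (a + n) * s + min (a + n) r) := by
  intro n
  induction n with
  | zero =>
    intro a acc
    simp [PySem.List.pyRange_one_eq_nil (by omega : a + (0 : Nat) ≤ a)]
  | succ k ih =>
    intro a acc
    rw [PySem.List.pyRange_one_cons (by push_cast; omega : a < a + ((k + 1 : Nat) : Int))]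
    simp only [List.foldl_cons, List.map_cons]
    have hstep : a * s + min a r + (s + (if a < r then 1 else 0)) = (a + 1) * s + min (a + 1) r := by
      rcases le_or_gt r a with h | h
      · rw [min_eq_right h, min_eq_right (by omega : r ≤ a + 1), if_neg (by omega)]; ring
      · rw [min_eq_left (le_of_lt h), min_eq_left (by omega : a + 1 ≤ r), if_pos h]; ring
    have harg : a + ((k + 1 : Nat) : Int) = (a + 1) + (k : Int) := by push_cast; ring
    rw [harg]
    have := ih (a + 1) (acc ++ [PySem.List.slice lst (some (a * s + min a r)) (some (a * s + min a r + (s + (if a < r then 1 else 0))))])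
    simp only [hstep] at this ⊢
    rw [this]
    simp

-- pvPopN with k ≤ len: the pops (in pop order) are the reversed last k elements,
-- and the remaining rest is the prefix.
theorem popN_eq : ∀ (k : Nat) (rest : List Int), k ≤ rest.length →
    pvPopN rest k = ((rest.drop (rest.length - k)).reverse, rest.take (rest.length - k)) := by
  intro k
  induction k with
  | zero => intro rest _; simp [pvPopN]
  | succ k' ih =>
    intro rest hk
    have hne : rest ≠ [] := by intro h; subst h; simp at hk
    have hlen : rest.dropLast.length = rest.length - 1 := by simp
    have h1 : k' ≤ rest.dropLast.length := by omega
    unfold pvPopN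
    rw [ih rest.dropLast h1]
    simp only [Prod.mk.injEq]
    have e1 : rest.length - (k' + 1) = rest.dropLast.length - k' := by omega
    refine ⟨?_, ?_⟩
    · rw [List.getLastD_eq_getLast?, List.getLast?_eq_getLast_of_ne_nil hne]
      have hd : rest.drop (rest.length - (k' + 1)) =
          rest.dropLast.drop (rest.dropLast.length - k') ++ [rest.getLast hne] := by
        rw [e1]
        generalize ht : rest.dropLast.length - k' = t
        have htle : t ≤ rest.dropLast.length := by omega
        conv_lhs => rw [← List.dropLast_append_getLast hne]
        rw [List.drop_append_of_le_length (by omega)]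
      simp [hd]
    · rw [e1]
      generalize ht : rest.dropLast.length - k' = t
      have htle : t ≤ rest.dropLast.length := by omega
      conv_rhs => rw [← List.dropLast_append_getLast hne]
      rw [List.take_append_of_le_length (by omega)]

-- Closed-form chunk boundaries and chunks of lst for parameters s, r.
def pvB (s r : Int) (j : Int) : Int := j * s + min j r
def pvC (lst : List Int) (s r : Int) (i : Int) : List Int :=
  PySem.List.slice lst (some (pvB s r i)) (some (pvB s r (i + 1)))

-- B's countdown loop over j = J..1, starting from the prefix lst.take (B J),
-- pops off exactly the chunks J-1, …, 0 in that order.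
theorem alt_loop (lst : List Int) (s r : Int) (hs : 0 ≤ s) (hr : 0 ≤ r) :
    ∀ (J : Nat) (out : List (List Int)), pvB s r (J : Int) ≤ (lst.length : Int) →
      (PySem.List.pyRange (J : Int) 0 (-1)).foldl
        (fun (st : List Int × List (List Int)) j =>
          let p := pvPopN st.1 ((PySem.Int.floordiv (st.1.length : Int) j).toNat)
          (p.2, st.2 ++ [p.1.reverse]))
        (lst.take (pvB s r (J : Int)).toNat, out)
      = ([], out ++ ((List.range J).map (fun i => pvC lst s r (i : Int))).reverse) := by
  intro J
  induction J with
  | zero =>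
    intro out _
    have h0 : pvB s r 0 = 0 := by simp [pvB, min_eq_left hr]
    simp [PySem.List.pyRange_neg_one_eq_nil (by omega : (0:Int) ≤ 0), h0]
  | succ J' ih =>
    intro out hB
    have hJpos : (0 : Int) < ((J' + 1 : Nat) : Int) := by push_cast; omega
    rw [PySem.List.pyRange_neg_one_cons hJpos]
    simp only [List.foldl_cons]
    set j : Int := ((J' + 1 : Nat) : Int) with hj
    have hBnn : 0 ≤ pvB s r j := by
      have h1 : 0 ≤ min j r := le_min (by omega) hr
      have h2 : 0 ≤ j * s := mul_nonneg (by omega) hs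
      simp only [pvB]; omega
    have hlen : ((lst.take (pvB s r j).toNat).length : Int) = pvB s r j := by
      simp only [List.length_take]
      omega
    have hq : PySem.Int.floordiv (pvB s r j) j = pvB s r j - pvB s r (j - 1) := by
      rw [PySem.Int.floordiv_eq_iff_of_pos hJpos]
      rcases le_or_gt j r with h | h
      · have h1 : min j r = j := min_eq_left h
        have h2 : min (j - 1) r = j - 1 := min_eq_left (by omega)
        simp only [pvB, h1, h2]
        constructor <;> nlinarith
      · have h1 : min j r = r := min_eq_right (by omega)
        have h2 : min (j - 1) r = r := min_eq_right (by omega)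
        simp only [pvB, h1, h2]
        constructor <;> nlinarith
    have hBmono : pvB s r (j - 1) ≤ pvB s r j := by
      have h1 : min (j - 1) r ≤ min j r := min_le_min (by omega) le_rfl
      have h2 : (j - 1) * s ≤ j * s := by nlinarith
      simp only [pvB]; omega
    have hB1nn : 0 ≤ pvB s r (j - 1) := by
      have h1 : 0 ≤ min (j - 1) r := le_min (by omega) hr
      have h2 : 0 ≤ (j - 1) * s := mul_nonneg (by omega) hs
      simp only [pvB]; omega
    have hkle : (PySem.Int.floordiv ((((lst.take (pvB s r j).toNat).length) : Int)) j).toNat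
        ≤ (lst.take (pvB s r j).toNat).length := by
      rw [hlen, hq]; omega
    rw [popN_eq _ _ hkle]
    have hcount : (lst.take (pvB s r j).toNat).length -
        (PySem.Int.floordiv (((lst.take (pvB s r j).toNat).length : Int)) j).toNat
        = (pvB s r (j - 1)).toNat := by
      rw [hlen, hq]
      omega
    simp only [hcount]
    have hj1 : j - 1 = ((J' : Nat) : Int) := by rw [hj]; push_cast; ring
    have hrest : (lst.take (pvB s r j).toNat).take (pvB s r (j - 1)).toNat
        = lst.take (pvB s r (j - 1)).toNat := by
      rw [List.take_take]
      congr 1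
      omega
    have hchunk : ((lst.take (pvB s r j).toNat).drop (pvB s r (j - 1)).toNat).reverse.reverse
        = pvC lst s r (j - 1) := by
      rw [List.reverse_reverse, List.drop_take]
      have hj2 : j - 1 + 1 = j := by ring
      rw [pvC, hj2, PySem.List.slice_toNat _ hB1nn hBnn]
    have hstep : pvB s r ((J' : Nat) : Int) ≤ (lst.length : Int) := by
      rw [← hj1]; exact le_trans hBmono hB
    rw [hrest, hchunk, hj1]
    rw [ih (out ++ [pvC lst s r ((J' : Nat) : Int)]) hstep]
    simp [List.range_succ]

-- ===== VERDICT (by name: the statement is the Claim_ definition above) =====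
theorem split_list_into_m_sublists_spec : Claim_equal_split_list_into_m_sublists := by
  intro lst m _ hm
  unfold Spec_split_list_into_m_sublists split_list_into_m_sublists split_list_into_m_sublists_alt
  rcases lt_or_gt_of_ne hm with h | h
  · simp [PySem.List.pyRange_one_eq_nil (le_of_lt h),
      PySem.List.pyRange_neg_one_eq_nil (le_of_lt h)]
  · set s := PySem.Int.floordiv (lst.length : Int) m with hsdef
    set r := PySem.Int.mod (lst.length : Int) m with hrdef
    have hs : 0 ≤ s := (PySem.Int.le_floordiv_iff_mul_le h).mpr (by simp)
    have hr : 0 ≤ r := PySem.Int.mod_nonneg _ h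
    have hrm : r < m := PySem.Int.mod_lt _ h
    have hdm : s * m + r = (lst.length : Int) := PySem.Int.floordiv_mul_add_mod _ _
    have hmnat : ((m.toNat : Nat) : Int) = m := by omega
    -- A's side: the fold is the map of closed-form slices
    have hA := fold_eq_map lst s r m.toNat 0 []
    rw [hmnat] at hA
    simp only [zero_add] at hA
    have hmin0 : min (0 : Int) r = 0 := min_eq_left hr
    rw [show (0 : Int) * s + min 0 r = 0 by rw [hmin0]; ring] at hA
    -- B's side: the countdown fold pops the same chunks back-to-front
    have hBm : pvB s r m = (lst.length : Int) := by
      simp only [pvB, min_eq_right (le_of_lt hrm)]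
      linarith [hdm]
    have hB := alt_loop lst s r hs hr m.toNat []
    rw [hmnat, hBm] at hB
    have htake : lst.take ((lst.length : Int)).toNat = lst := by simp
    have hB2 := hB le_rfl
    rw [htake] at hB2
    dsimp only
    rw [hB2]
    have h1 := congrArg Prod.fst hA
    dsimp only at h1
    rw [h1]
    simp [PySem.List.pyRange_one, pvC, pvB]
    rw [show (List.flatMap (fun a : Nat => [(↑a : Int)]) (List.range m.toNat))
          = List.map (fun a : Nat => (↑a : Int)) (List.range m.toNat) from by
        induction (List.range m.toNat) with
        | nil => rfl
        | cons x xs ih => simp [ih],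
      List.map_map]
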